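-- pv_equiv track=rewrite | github.com/Pr0x1mo/SHIELD | SHIELD/trainer.py | compute_line_position
-- ===== SOURCE A (Python) =====
-- from typing import Iterable, List, Tuple, Dict, Any
--
-- def compute_line_position(text: str, start: int, end: int) -> Tuple[int, int, int]:
--     """Return (line_number [1-based], left, right) for a char span."""
--     lines = text.splitlines()
--     offset = 0
--     for i, line in enumerate(lines):
--         line_len = len(line) + 1  # include newline
--         if offset + line_len > start:
--             left = start - offset
--             right = end - offset
--             return i + 1, left, right  # 1-based line numbers
--         offset += line_len
--     return -1, -1, -1
-- ===== SOURCE B (Python) =====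
-- def compute_line_position(text, start, end):
--     """Return (line_number [1-based], left, right) for a char span."""
--     # cumulative offsets: ends[i] = offset just past line i's (virtual) newline
--     ends = []
--     total = 0
--     for line in text.splitlines():
--         total += len(line) + 1
--         ends.append(total)
--     # binary search: first index lo with ends[lo] > start (bisect_right)
--     lo, hi = 0, len(ends)
--     while lo < hi:
--         mid = (lo + hi) // 2
--         if ends[mid] <= start:
--             lo = mid + 1
--         else:
--             hi = mid
--     if lo == len(ends):
--         return -1, -1, -1
--     line_start = ends[lo - 1] if lo else 0
--     return lo + 1, start - line_start, end - line_start
-- ===== Notes on version B (the rewrite author's own statement) =====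
-- stated objective: alternative
-- what changed: B builds the list of cumulative line-end offsets once and then locates the line by a bisect_right-style binary search for the first offset exceeding start, instead of A's single linear scan with a running offset and early return.
import Mathlib
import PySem

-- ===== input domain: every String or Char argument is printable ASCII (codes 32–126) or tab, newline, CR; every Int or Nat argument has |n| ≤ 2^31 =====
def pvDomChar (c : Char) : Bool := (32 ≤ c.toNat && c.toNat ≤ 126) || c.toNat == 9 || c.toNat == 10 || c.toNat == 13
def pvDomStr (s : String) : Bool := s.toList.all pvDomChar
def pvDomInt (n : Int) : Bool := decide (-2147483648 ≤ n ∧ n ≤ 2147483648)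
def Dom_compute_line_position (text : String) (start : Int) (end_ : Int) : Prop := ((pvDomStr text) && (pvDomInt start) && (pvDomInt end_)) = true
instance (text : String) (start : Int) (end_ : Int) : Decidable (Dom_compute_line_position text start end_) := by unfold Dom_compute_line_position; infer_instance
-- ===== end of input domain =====

-- B replaces A's linear scan with cumulative line-end offsets plus a bisect_right-style binary search (alternative decomposition, same return value).

-- ===== PORT A =====
-- A's for-loop over enumerate(splitlines) with running offset and early return
def clpLoopA (lines : List String) (offset : Int) (i : Int) (start : Int) (end_ : Int) : Int × Int × Int :=
  match lines with
  | [] => (-1, -1, -1)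
  | l :: ls =>
    let line_len : Int := (l.toList.length : Int) + 1
    if offset + line_len > start then
      (i + 1, start - offset, end_ - offset)
    else
      clpLoopA ls (offset + line_len) (i + 1) start end_

def compute_line_position (text : String) (start : Int) (end_ : Int) : Int × Int × Int :=
  clpLoopA (PySem.Str.splitlines text) 0 0 start end_

-- ===== PORT B =====
-- the ends-building loop: total += len(line)+1; ends.append(total)
def clpBuildEnds (lines : List String) (total : Int) : List Int :=
  match lines with
  | [] => []
  | l :: ls =>
    let t := total + (l.toList.length : Int) + 1
    t :: clpBuildEnds ls t

-- the 'while lo < hi' binary search (bisect_right); ends[mid] is always in range when taken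
def clpBisect (ends : List Int) (start : Int) (lo hi : Nat) : Nat :=
  if _h : lo < hi then
    if ends.getD ((lo + hi) / 2) 0 ≤ start then clpBisect ends start ((lo + hi) / 2 + 1) hi
    else clpBisect ends start lo ((lo + hi) / 2)
  else lo
termination_by hi - lo
decreasing_by all_goals omega

def compute_line_position_alt (text : String) (start : Int) (end_ : Int) : Int × Int × Int :=
  let ends := clpBuildEnds (PySem.Str.splitlines text) 0
  let lo := clpBisect ends start 0 ends.length
  if lo = ends.length then (-1, -1, -1)
  else
    let line_start : Int := if lo = 0 then 0 else ends.getD (lo - 1) 0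
    ((lo : Int) + 1, start - line_start, end_ - line_start)

-- ===== PRECONDITION & SPEC =====
def Spec_compute_line_position (text : String) (start : Int) (end_ : Int) (out : Int × Int × Int) : Prop := out = compute_line_position_alt text start end_
instance (text : String) (start : Int) (end_ : Int) (out : Int × Int × Int) : Decidable (Spec_compute_line_position text start end_ out) := by unfold Spec_compute_line_position; infer_instance

-- ===== CLAIM (what is proved, stated in full; the proofs are below) =====
def Claim_equal_compute_line_position : Prop := ∀ (text : String) (start : Int) (end_ : Int), Dom_compute_line_position text start end_ → Spec_compute_line_position text start end_ (compute_line_position text start end_)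

-- ===== LEMMAS AND PROOFS =====

-- first index of ends with start < ends[k] (= ends.length if none): the index A's scan stops at
def clpFirstGt (ends : List Int) (start : Int) : Nat :=
  match ends with
  | [] => 0
  | e :: es => if start < e then 0 else clpFirstGt es start + 1

-- the common shape both programs compute, phrased over the ends list
def clpFromEnds (ends : List Int) (base i start end_ : Int) : Int × Int × Int :=
  if clpFirstGt ends start = ends.length then (-1, -1, -1)
  else
    let ls : Int := if clpFirstGt ends start = 0 then base else ends.getD (clpFirstGt ends start - 1) 0
    (i + (clpFirstGt ends start : Int) + 1, start - ls, end_ - ls)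

theorem clpFirstGt_le_length (ends : List Int) (start : Int) :
    clpFirstGt ends start ≤ ends.length := by
  induction ends with
  | nil => simp [clpFirstGt]
  | cons e es ih =>
    simp only [clpFirstGt, List.length_cons]
    split <;> omega

theorem clpFirstGt_prefix_le (ends : List Int) (start : Int) :
    ∀ i < clpFirstGt ends start, ends.getD i 0 ≤ start := by
  induction ends with
  | nil => simp [clpFirstGt]
  | cons e es ih =>
    intro i hi
    simp only [clpFirstGt] at hi
    by_cases hse : start < e
    · rw [if_pos hse] at hi; omega
    · rw [if_neg hse] at hi
      match i with
      | 0 => simp only [List.getD_cons_zero]; omega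
      | Nat.succ j => simpa using ih j (by omega)

theorem clpFirstGt_gt (ends : List Int) (start : Int)
    (h : clpFirstGt ends start < ends.length) :
    start < ends.getD (clpFirstGt ends start) 0 := by
  induction ends with
  | nil => simp [clpFirstGt] at h
  | cons e es ih =>
    simp only [clpFirstGt, List.length_cons] at h ⊢
    by_cases hse : start < e
    · simp [hse]
    · rw [if_neg hse] at h ⊢
      simpa using ih (by omega)

-- every element of clpBuildEnds ls base is > base
theorem clpBuildEnds_gt_base (lines : List String) (base : Int) :
    ∀ x ∈ clpBuildEnds lines base, base < x := by
  induction lines generalizing base with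
  | nil => simp [clpBuildEnds]
  | cons l ls ih =>
    intro x hx
    simp only [clpBuildEnds, List.mem_cons] at hx
    rcases hx with rfl | hx
    · have : (0 : Int) ≤ (l.toList.length : Int) := by positivity
      omega
    · have h1 := ih (base + (l.toList.length : Int) + 1) x hx
      have : (0 : Int) ≤ (l.toList.length : Int) := by positivity
      omega

-- clpBuildEnds is monotone
theorem clpBuildEnds_mono (lines : List String) (base : Int) :
    ∀ i j, i ≤ j → j < (clpBuildEnds lines base).length →
      (clpBuildEnds lines base).getD i 0 ≤ (clpBuildEnds lines base).getD j 0 := by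
  induction lines generalizing base with
  | nil => simp [clpBuildEnds]
  | cons l ls ih =>
    intro i j hij hj
    simp only [clpBuildEnds, List.length_cons] at hj ⊢
    match i, j with
    | 0, 0 => simp
    | 0, Nat.succ j' =>
      simp only [List.getD_cons_zero, List.getD_cons_succ]
      have hmem : (clpBuildEnds ls (base + (l.toList.length : Int) + 1)).getD j' 0 ∈
          clpBuildEnds ls (base + (l.toList.length : Int) + 1) := by
        rw [List.getD_eq_getElem _ _ (by omega)]
        exact List.getElem_mem _
      have := clpBuildEnds_gt_base ls (base + (l.toList.length : Int) + 1) _ hmem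
      omega
    | Nat.succ i', Nat.succ j' =>
      simp only [List.getD_cons_succ]
      exact ih _ i' j' (by omega) (by omega)

-- the binary search returns the first index with ends[·] > start, given monotone ends and a valid bracket
theorem clpBisect_eq_firstGt (ends : List Int) (start : Int)
    (hmono : ∀ i j, i ≤ j → j < ends.length → ends.getD i 0 ≤ ends.getD j 0) :
    ∀ lo hi, lo ≤ hi → hi ≤ ends.length →
      (∀ i < lo, ends.getD i 0 ≤ start) →
      (∀ i, hi ≤ i → i < ends.length → start < ends.getD i 0) →
      clpBisect ends start lo hi = clpFirstGt ends start := by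
  intro lo hi
  induction hn : hi - lo using Nat.strong_induction_on generalizing lo hi with
  | _ n ih =>
    intro hle hhi hpre hpost
    rw [clpBisect]
    by_cases hlt : lo < hi
    · rw [dif_pos hlt]
      by_cases hcmp : ends.getD ((lo + hi) / 2) 0 ≤ start
      · rw [if_pos hcmp]
        refine ih (hi - ((lo + hi) / 2 + 1)) (by omega) ((lo + hi) / 2 + 1) hi rfl (by omega) hhi ?_ hpost
        intro i hi'
        exact le_trans (hmono i ((lo + hi) / 2) (by omega) (by omega)) hcmp
      · rw [if_neg hcmp]
        rw [not_le] at hcmp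
        refine ih ((lo + hi) / 2 - lo) (by omega) lo ((lo + hi) / 2) rfl (by omega) (by omega) hpre ?_
        intro i hi1 hi2
        exact lt_of_lt_of_le hcmp (hmono ((lo + hi) / 2) i hi1 hi2)
    · rw [dif_neg hlt]
      have hlohi : lo = hi := by omega
      subst hlohi
      have h1 := clpFirstGt_le_length ends start
      rcases lt_trichotomy lo (clpFirstGt ends start) with hc | hc | hc
      · have h2 := clpFirstGt_prefix_le ends start lo hc
        have h3 := hpost lo (le_refl _) (by omega)
        omega
      · exact hc
      · have h4 := hpre _ hc
        have h5 := clpFirstGt_gt ends start (by omega)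
        omega

-- A's scan expressed through B's ends list
theorem clpLoopA_char (lines : List String) (offset i start end_ : Int) :
    clpLoopA lines offset i start end_ = clpFromEnds (clpBuildEnds lines offset) offset i start end_ := by
  induction lines generalizing offset i with
  | nil => simp [clpLoopA, clpBuildEnds, clpFromEnds, clpFirstGt]
  | cons l ls ih =>
    have hL : (0 : Int) ≤ (l.toList.length : Int) := by positivity
    by_cases hse : start < offset + (l.toList.length : Int) + 1
    · have hgt : offset + ((l.toList.length : Int) + 1) > start := by omega
      simp only [clpLoopA, clpBuildEnds, clpFromEnds, clpFirstGt, if_pos hgt, if_pos hse,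
        List.length_cons]
      simp [List.length_cons]
    · have hngt : ¬ (offset + ((l.toList.length : Int) + 1) > start) := by omega
      simp only [clpLoopA, clpBuildEnds, clpFromEnds, clpFirstGt, if_neg hngt, if_neg hse,
        List.length_cons]
      have harith : offset + ((l.toList.length : Int) + 1) = offset + (l.toList.length : Int) + 1 := by ring
      rw [harith, ih]
      generalize clpBuildEnds ls (offset + (l.toList.length : Int) + 1) = es
      unfold clpFromEnds
      by_cases hk : clpFirstGt es start = es.length
      · rw [if_pos hk, if_pos (by omega)]
      · rw [if_neg hk, if_neg (by omega : ¬ clpFirstGt es start + 1 = es.length + 1)]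
        by_cases hz : clpFirstGt es start = 0
        · rw [hz]
          refine Prod.ext ?_ (Prod.ext rfl rfl)
          push_cast; ring
        · rw [if_neg hz, if_neg (by omega : ¬ clpFirstGt es start + 1 = 0)]
          have hidx : clpFirstGt es start + 1 - 1 = clpFirstGt es start := by omega
          rw [hidx]
          have hgd : ((offset + (l.toList.length : Int) + 1) :: es).getD (clpFirstGt es start) 0
              = es.getD (clpFirstGt es start - 1) 0 := by
            match h : clpFirstGt es start, hz with
            | Nat.succ k', _ => simp
          rw [hgd]
          refine Prod.ext ?_ (Prod.ext rfl rfl)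
          push_cast; ring

-- ===== VERDICT (by name: the statement is the Claim_ definition above) =====
theorem compute_line_position_spec : Claim_equal_compute_line_position := by
  intro text start end_ _
  unfold Spec_compute_line_position compute_line_position compute_line_position_alt
  rw [clpLoopA_char]
  have hbis := clpBisect_eq_firstGt (clpBuildEnds (PySem.Str.splitlines text) 0) start
    (clpBuildEnds_mono _ 0) 0 (clpBuildEnds (PySem.Str.splitlines text) 0).length
    (by omega) (le_refl _) (by omega) (by omega)
  simp only [hbis]
  generalize clpBuildEnds (PySem.Str.splitlines text) 0 = es
  unfold clpFromEnds
  by_cases hk : clpFirstGt es start = es.length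
  · rw [if_pos hk, if_pos hk]
  · rw [if_neg hk, if_neg hk]
    refine Prod.ext ?_ (Prod.ext rfl rfl)
    push_cast; ring
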